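-- pv_equiv track=rewrite | github.com/cornell-cup/C1C0_path_planning | irobot_sdk/sensor_zones.py | sensor_zones
-- ===== SOURCE A (Python) =====
-- def sensor_zones(sensors_count, colors):
--     zones = []
--     zones_count = len(colors)
--
--     if zones_count <= 0:
--         raise ValueError('There must be at least one sensor detection zone.')
--
--     pixels_per_zone = sensors_count // zones_count
--     remaining_pixels = sensors_count % zones_count
--
--     for i in range(0, zones_count):
--         newZone = [colors[i]] * pixels_per_zone
--         zones += newZone
--
--     # try to distribute the remaining pixels (if any) in a symmetric way:
--     if remaining_pixels != 0:
--         if zones_count % 2 == 0: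
--             if remaining_pixels % 2 == 0:
--                 # picks the color of the corresponding zone to generate the extra pixels
--                 # first zone
--                 zones = [colors[0]] * (remaining_pixels // 2) + zones
--                 # last zone
--                 zones += [colors[zones_count - 1]] * (remaining_pixels // 2)
--             else:
--                 # pixels can not be distributed symmetrically
--                 raise ValueError('Invalid sensor detection zones count.')
--         else:
--             # picks the color from the central zone to generate the extra pixels
--             extraPixels = [colors[zones_count // 2]] * (remaining_pixels)
--             for i in extraPixels:
--                 zones.insert(len(zones) // 2, i)  # central zone
--
--     return zones
-- ===== SOURCE B (Python) =====
-- def sensor_zones(sensors_count, colors):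
--     zones_count = len(colors)
--     if zones_count <= 0:
--         raise ValueError('There must be at least one sensor detection zone.')
--     q, r = divmod(sensors_count, zones_count)
--     # two symmetric pointers walk from both ends toward the centre:
--     # front collects the left zones, back the right zones (outermost first)
--     lo, hi = 0, zones_count - 1
--     front, back = [], []
--     while lo < hi:
--         front += [colors[lo]] * q
--         back += [colors[hi]] * q
--         lo += 1
--         hi -= 1
--     if lo == hi:
--         # lone centre zone: it also carries the r leftover pixels
--         mid = [colors[lo]] * q + [colors[lo]] * r
--     else:
--         mid = []
--     back.reverse()  # blocks of identical pixels: reversing restores zone order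
--     core = front + mid + back
--     if r != 0 and zones_count % 2 == 0:
--         if r % 2 != 0:
--             raise ValueError('Invalid sensor detection zones count.')
--         return [colors[0]] * (r // 2) + core + [colors[-1]] * (r // 2)
--     return core
-- ===== Notes on version B (the rewrite author's own statement) =====
-- stated objective: alternative
-- what changed: Replaces A's left-to-right fill loop plus repeated central list.insert mutations with an outside-in two-pointer recursion that builds symmetric zone pairs from both ends toward the centre, the lone centre zone (odd count) carrying the leftover pixels.
import Mathlib
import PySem

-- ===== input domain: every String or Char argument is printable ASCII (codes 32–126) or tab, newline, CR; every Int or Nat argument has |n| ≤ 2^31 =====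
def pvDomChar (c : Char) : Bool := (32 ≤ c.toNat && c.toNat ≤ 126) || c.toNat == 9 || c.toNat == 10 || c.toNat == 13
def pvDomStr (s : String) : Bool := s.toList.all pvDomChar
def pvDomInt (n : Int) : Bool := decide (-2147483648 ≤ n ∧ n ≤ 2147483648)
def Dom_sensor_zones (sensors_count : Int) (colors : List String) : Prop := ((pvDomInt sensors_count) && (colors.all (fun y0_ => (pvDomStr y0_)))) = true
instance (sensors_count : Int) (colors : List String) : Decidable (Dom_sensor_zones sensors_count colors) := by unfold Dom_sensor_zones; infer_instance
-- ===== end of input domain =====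

-- B replaces A's left-to-right fill loop plus repeated central list.insert mutations with an
-- outside-in two-pointer loop: symmetric zone pairs are collected from both ends toward the
-- centre, and the lone centre zone (odd count) carries the leftover pixels (alternative).

-- ===== PORT A =====
def sensor_zones (sensors_count : Int) (colors : List String) : List String :=
  let zones_count : Int := (colors.length : Int)
  if zones_count ≤ 0 then []  -- raise ValueError: excluded by Pre_
  else
    let pixels_per_zone := PySem.Int.floordiv sensors_count zones_count
    let remaining_pixels := PySem.Int.mod sensors_count zones_count
    -- for i in range(0, zones_count): zones += [colors[i]] * pixels_per_zone
    -- colors[i] ported as pyGetD (i is always in range); [x]*k is replicate k.toNat (negative k → [])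
    let zones := (PySem.List.pyRange 0 zones_count 1).foldl
      (fun zones i => zones ++ List.replicate pixels_per_zone.toNat (PySem.List.pyGetD colors i "")) []
    if remaining_pixels ≠ 0 then
      if PySem.Int.mod zones_count 2 = 0 then
        if PySem.Int.mod remaining_pixels 2 = 0 then
          List.replicate (PySem.Int.floordiv remaining_pixels 2).toNat (PySem.List.pyGetD colors 0 "")
            ++ zones
            ++ List.replicate (PySem.Int.floordiv remaining_pixels 2).toNat (PySem.List.pyGetD colors (zones_count - 1) "")
        else []  -- raise ValueError: excluded by Pre_
      else
        -- for i in extraPixels: zones.insert(len(zones)//2, i)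
        let extraPixels := List.replicate remaining_pixels.toNat
          (PySem.List.pyGetD colors (PySem.Int.floordiv zones_count 2) "")
        extraPixels.foldl
          (fun zones i => PySem.List.insert zones (PySem.Int.floordiv (zones.length : Int) 2) i) zones
    else zones

-- ===== PORT B =====
-- while lo < hi: two symmetric pointers walk from both ends toward the centre
def szLoop (colors : List String) (q : Int) (lo hi : Nat) (front back : List String) :
    List String × List String × Nat × Nat :=
  if lo < hi then
    szLoop colors q (lo + 1) (hi - 1)
      (front ++ List.replicate q.toNat (PySem.List.pyGetD colors (lo : Int) ""))
      (back ++ List.replicate q.toNat (PySem.List.pyGetD colors (hi : Int) ""))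
  else (front, back, lo, hi)
termination_by hi - lo
decreasing_by omega

def sensor_zones_alt (sensors_count : Int) (colors : List String) : List String :=
  let zones_count : Int := (colors.length : Int)
  if zones_count ≤ 0 then []  -- raise ValueError: excluded by Pre_
  else
    let q := PySem.Int.floordiv sensors_count zones_count
    let r := PySem.Int.mod sensors_count zones_count
    let res := szLoop colors q 0 (colors.length - 1) [] []
    let front := res.1
    let back := res.2.1
    let lo := res.2.2.1
    let hi := res.2.2.2
    -- lone centre zone (odd count): it also carries the r leftover pixels
    let mid := if lo = hi then
        List.replicate q.toNat (PySem.List.pyGetD colors (lo : Int) "")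
          ++ List.replicate r.toNat (PySem.List.pyGetD colors (lo : Int) "")
      else []
    -- back.reverse: blocks of identical pixels, reversing restores zone order
    let core := front ++ mid ++ back.reverse
    if r ≠ 0 ∧ PySem.Int.mod zones_count 2 = 0 then
      if PySem.Int.mod r 2 ≠ 0 then []  -- raise ValueError: excluded by Pre_
      else
        List.replicate (PySem.Int.floordiv r 2).toNat (PySem.List.pyGetD colors 0 "")
          ++ core
          ++ List.replicate (PySem.Int.floordiv r 2).toNat (PySem.List.pyGetD colors (-1) "")
    else core

-- ===== PRECONDITION & SPEC =====
-- Pre_ excludes exactly the inputs on which A raises ValueError: empty colors, and an even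
-- zone count with an odd number of leftover pixels.
def Pre_sensor_zones (sensors_count : Int) (colors : List String) : Prop :=
  colors ≠ [] ∧
    (PySem.Int.mod (colors.length : Int) 2 = 0 →
      PySem.Int.mod (PySem.Int.mod sensors_count (colors.length : Int)) 2 = 0)
instance (sensors_count : Int) (colors : List String) : Decidable (Pre_sensor_zones sensors_count colors) := by unfold Pre_sensor_zones; infer_instance

def pvWitness_sensor_zones : Int × List String := (7, ["r", "g", "b"])

def Spec_sensor_zones (sensors_count : Int) (colors : List String) (out : List String) : Prop := out = sensor_zones_alt sensors_count colors
instance (sensors_count : Int) (colors : List String) (out : List String) : Decidable (Spec_sensor_zones sensors_count colors out) := by unfold Spec_sensor_zones; infer_instance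

-- ===== CLAIM (what is proved, stated in full; the proofs are below) =====
def Claim_equal_sensor_zones : Prop := ∀ (sensors_count : Int) (colors : List String), Dom_sensor_zones sensors_count colors → Pre_sensor_zones sensors_count colors → Spec_sensor_zones sensors_count colors (sensor_zones sensors_count colors)

-- ===== LEMMAS AND PROOFS =====

-- A's fill loop equals the flatten of per-zone blocks.
theorem fill_loop_eq_flatMap (colors : List String) (pn : Nat) :
    (PySem.List.pyRange 0 (colors.length : Int) 1).foldl
      (fun zones i => zones ++ List.replicate pn (PySem.List.pyGetD colors i "")) [] =
    colors.flatMap (fun c => List.replicate pn c) := by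
  rw [PySem.List.foldl_append_eq_flatMap]
  simp only [List.nil_append, List.flatMap_def]
  rw [show (fun i => List.replicate pn (PySem.List.pyGetD colors i "")) =
        (fun c => List.replicate pn c) ∘ (fun i => PySem.List.pyGetD colors i "") from rfl,
      ← List.map_map, PySem.List.map_pyGetD_pyRange_zero']

-- One central insert of x into T ++ x^k ++ D lands inside the run of x's.
theorem insert_mid_step {α : Type} (T D : List α) (x : α) (k : Nat)
    (hT : T.length = (T.length + D.length) / 2) :
    PySem.List.insert (T ++ List.replicate k x ++ D)
      (PySem.Int.floordiv (((T ++ List.replicate k x ++ D).length : Int)) 2) x =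
    T ++ List.replicate (k + 1) x ++ D := by
  have hlen : (T ++ List.replicate k x ++ D).length = T.length + k + D.length := by
    simp [List.length_append]; omega
  have hfd : PySem.Int.floordiv (((T ++ List.replicate k x ++ D).length : Int)) 2
      = (((T.length + k + D.length) / 2 : Nat) : Int) := by
    rw [hlen]; exact_mod_cast PySem.Int.floordiv_natCast (T.length + k + D.length) 2
  have h1 : T.length ≤ (T.length + k + D.length) / 2 := by omega
  have h2 : (T.length + k + D.length) / 2 ≤ T.length + k := by omega
  generalize hm : (T.length + k + D.length) / 2 = m at hfd h1 h2
  rw [hfd, PySem.List.insert_natCast _ m x (by rw [hlen]; omega)]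
  have hTk : (T ++ List.replicate k x).length = T.length + k := by simp
  rw [List.take_append, List.drop_append, hTk,
      show m - (T.length + k) = 0 from by omega, List.take_zero, List.drop_zero,
      List.take_append, List.drop_append,
      List.take_of_length_le h1, List.drop_eq_nil_of_le h1,
      List.take_replicate, List.drop_replicate, min_eq_left (by omega)]
  simp only [List.append_nil, List.nil_append, List.append_assoc]
  rw [show (x :: (List.replicate (k - (m - T.length)) x ++ D))
        = List.replicate (k - (m - T.length) + 1) x ++ D from by simp [List.replicate_succ],
      ← List.append_assoc (List.replicate (m - T.length) x), ← List.replicate_add,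
      show m - T.length + (k - (m - T.length) + 1) = k + 1 from by omega]

-- A's insert loop splices all r leftover copies at the fixed midpoint of the original body.
theorem insert_mid_foldl {α : Type} (T D : List α) (x : α)
    (hT : T.length = (T.length + D.length) / 2) :
    ∀ (j k : Nat),
      (List.replicate j x).foldl
        (fun zones i => PySem.List.insert zones (PySem.Int.floordiv ((zones.length : Int)) 2) i)
        (T ++ List.replicate k x ++ D) =
      T ++ List.replicate (k + j) x ++ D := by
  intro j
  induction j with
  | zero => intro k; simp
  | succ j ih =>
      intro k
      rw [List.replicate_succ, List.foldl_cons, insert_mid_step T D x k hT, ih (k + 1),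
          show k + 1 + j = k + (j + 1) from by omega]

-- segFlat colors k lo cnt = the concatenation of k-blocks for colors[lo], …, colors[lo+cnt-1].
def segFlat (colors : List String) (k : Nat) : Nat → Nat → List String
  | _, 0 => []
  | lo, cnt + 1 => List.replicate k (colors.getD lo "") ++ segFlat colors k (lo + 1) cnt

theorem segFlat_succ_right (colors : List String) (k : Nat) :
    ∀ cnt lo, segFlat colors k lo (cnt + 1)
      = segFlat colors k lo cnt ++ List.replicate k (colors.getD (lo + cnt) "") := by
  intro cnt
  induction cnt with
  | zero => intro lo; simp [segFlat]
  | succ c ih =>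
      intro lo
      have e1 : segFlat colors k lo (c + 1 + 1)
          = List.replicate k (colors.getD lo "") ++ segFlat colors k (lo + 1) (c + 1) := rfl
      have e2 : segFlat colors k lo (c + 1)
          = List.replicate k (colors.getD lo "") ++ segFlat colors k (lo + 1) c := rfl
      rw [e1, ih (lo + 1), e2, show lo + 1 + c = lo + (c + 1) from by omega, List.append_assoc]

theorem segFlat_eq_flatMap (colors : List String) (k : Nat) :
    ∀ cnt lo, lo + cnt ≤ colors.length →
      segFlat colors k lo cnt
        = ((colors.drop lo).take cnt).flatMap (fun c => List.replicate k c) := by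
  intro cnt
  induction cnt with
  | zero => intro lo _; simp [segFlat]
  | succ c ih =>
      intro lo h
      have hlo : lo < colors.length := by omega
      rw [List.drop_eq_getElem_cons hlo, List.take_succ_cons, List.flatMap_cons]
      simp only [segFlat]
      rw [ih (lo + 1) (by omega), List.getD_eq_getElem _ _ hlo]

-- revSegFlat colors k hi cnt = the k-blocks for colors[hi], colors[hi-1], …, colors[hi-cnt+1].
def revSegFlat (colors : List String) (k : Nat) : Nat → Nat → List String
  | _, 0 => []
  | hi, cnt + 1 => List.replicate k (colors.getD hi "") ++ revSegFlat colors k (hi - 1) cnt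

theorem revSegFlat_reverse (colors : List String) (k : Nat) :
    ∀ cnt hi, cnt ≤ hi + 1 →
      (revSegFlat colors k hi cnt).reverse = segFlat colors k (hi + 1 - cnt) cnt := by
  intro cnt
  induction cnt with
  | zero => intro hi _; simp [revSegFlat, segFlat]
  | succ c ih =>
      intro hi h
      rcases Nat.eq_zero_or_pos hi with h0 | hpos
      · subst h0
        have hc : c = 0 := by omega
        subst hc
        simp [revSegFlat, segFlat, List.reverse_replicate]
      · rw [show revSegFlat colors k hi (c + 1)
              = List.replicate k (colors.getD hi "") ++ revSegFlat colors k (hi - 1) c from rfl,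
            List.reverse_append, List.reverse_replicate, ih (hi - 1) (by omega),
            show hi + 1 - (c + 1) = hi - c from by omega,
            segFlat_succ_right colors k c (hi - c),
            show hi - c + c = hi from by omega,
            show hi - 1 + 1 - c = hi - c from by omega]

theorem segFlat_append (colors : List String) (k : Nat) :
    ∀ a lo b, segFlat colors k lo a ++ segFlat colors k (lo + a) b
      = segFlat colors k lo (a + b) := by
  intro a
  induction a with
  | zero => intro lo b; simp [segFlat]
  | succ a ih =>
      intro lo b
      rw [show segFlat colors k lo (a + 1)
            = List.replicate k (colors.getD lo "") ++ segFlat colors k (lo + 1) a from rfl,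
          List.append_assoc, show lo + (a + 1) = lo + 1 + a from by omega, ih (lo + 1) b,
          show a + 1 + b = a + b + 1 from by omega,
          show segFlat colors k lo (a + b + 1)
            = List.replicate k (colors.getD lo "") ++ segFlat colors k (lo + 1) (a + b) from rfl]

-- Characterization of the two-pointer loop.
theorem szLoop_char (colors : List String) (q : Int) :
    ∀ d lo front back,
      szLoop colors q lo (lo + d) front back =
        (front ++ segFlat colors q.toNat lo ((d + 1) / 2),
         back ++ revSegFlat colors q.toNat (lo + d) ((d + 1) / 2),
         lo + (d + 1) / 2, lo + d - (d + 1) / 2) := by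
  intro d
  induction d using Nat.strong_induction_on with
  | _ d ih =>
    intro lo front back
    match d with
    | 0 =>
        rw [szLoop, if_neg (show ¬ (lo < lo + 0) from by omega)]
        simp [segFlat, revSegFlat]
    | 1 =>
        rw [szLoop, if_pos (show lo < lo + 1 from by omega),
            show lo + 1 - 1 = lo from rfl, szLoop, if_neg (show ¬ (lo + 1 < lo) from by omega),
            PySem.List.pyGetD_natCast, PySem.List.pyGetD_natCast]
        simp [segFlat, revSegFlat]
    | (d + 2) =>
        rw [szLoop, if_pos (show lo < lo + (d + 2) from by omega),
            show lo + (d + 2) - 1 = (lo + 1) + d from by omega,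
            ih d (by omega),
            PySem.List.pyGetD_natCast, PySem.List.pyGetD_natCast,
            show (d + 2 + 1) / 2 = (d + 1) / 2 + 1 from by omega,
            show segFlat colors q.toNat lo ((d + 1) / 2 + 1)
              = List.replicate q.toNat (colors.getD lo "")
                  ++ segFlat colors q.toNat (lo + 1) ((d + 1) / 2) from rfl,
            show revSegFlat colors q.toNat (lo + (d + 2)) ((d + 1) / 2 + 1)
              = List.replicate q.toNat (colors.getD (lo + (d + 2)) "")
                  ++ revSegFlat colors q.toNat (lo + (d + 2) - 1) ((d + 1) / 2) from rfl,
            show lo + (d + 2) - 1 = lo + 1 + d from by omega,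
            show lo + ((d + 1) / 2 + 1) = lo + 1 + (d + 1) / 2 from by omega,
            show lo + (d + 2) - ((d + 1) / 2 + 1) = lo + 1 + d - (d + 1) / 2 from by omega]
        simp [List.append_assoc]

-- length of a flatten of k-blocks
theorem flatMap_replicate_length {α : Type} (l : List α) (k : Nat) :
    (l.flatMap (fun c => List.replicate k c)).length = l.length * k := by
  induction l with
  | nil => simp
  | cons a t ih => simp [ih]; ring

-- splicing rr copies of x at the midpoint of P ++ x^k ++ S (P, S of equal length) merges runs
theorem take_drop_mid {α : Type} (P S : List α) (x : α) (k rr : Nat)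
    (hPS : P.length = S.length) :
    (P ++ List.replicate k x ++ S).take ((P ++ List.replicate k x ++ S).length / 2)
      ++ List.replicate rr x
      ++ (P ++ List.replicate k x ++ S).drop ((P ++ List.replicate k x ++ S).length / 2)
      = P ++ (List.replicate k x ++ List.replicate rr x) ++ S := by
  have hlen : (P ++ List.replicate k x ++ S).length = P.length + k + S.length := by
    simp [List.length_append]; omega
  set m := (P ++ List.replicate k x ++ S).length / 2 with hm
  have hm' : m = P.length + k / 2 := by rw [hm, hlen]; omega
  have h1 : P.length ≤ m := by omega
  have h2 : m ≤ P.length + k := by omega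
  have hPk : (P ++ List.replicate k x).length = P.length + k := by simp
  rw [List.take_append, List.drop_append, hPk,
      show m - (P.length + k) = 0 from by omega, List.take_zero, List.drop_zero,
      List.take_append, List.drop_append,
      List.take_of_length_le h1, List.drop_eq_nil_of_le h1,
      List.take_replicate, List.drop_replicate, min_eq_left (by omega)]
  simp only [List.append_nil, List.nil_append, List.append_assoc]
  congr 1
  have hsum : m - P.length + (rr + (k - (m - P.length))) = k + rr := by omega
  simp only [← List.append_assoc, ← List.replicate_add, hsum]

theorem sensor_zones_eq (sensors_count : Int) (colors : List String)
    (hpre : Pre_sensor_zones sensors_count colors) :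
    sensor_zones sensors_count colors = sensor_zones_alt sensors_count colors := by
  obtain ⟨hne, heven⟩ := hpre
  have hz : 0 < colors.length := List.length_pos_iff.mpr hne
  unfold sensor_zones sensor_zones_alt
  simp only [if_neg (show ¬ ((colors.length : Int) ≤ 0) from by omega)]
  set p := PySem.Int.floordiv sensors_count (colors.length : Int) with hp
  set r := PySem.Int.mod sensors_count (colors.length : Int) with hr
  rw [fill_loop_eq_flatMap colors p.toNat]
  set body := colors.flatMap (fun c => List.replicate p.toNat c) with hbody
  set n := colors.length with hn
  have hrnn : 0 ≤ r := by rw [hr]; exact PySem.Int.mod_nonneg _ (by exact_mod_cast hz)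
  have hloop := szLoop_char colors p (n - 1) 0 [] []
  rw [show (0 : Nat) + (n - 1) = n - 1 from by omega,
      show (n - 1 + 1) / 2 = n / 2 from by omega] at hloop
  simp only [List.nil_append, Nat.zero_add] at hloop
  rw [hloop]
  by_cases hzeven : PySem.Int.mod ((n : Nat) : Int) 2 = 0
  · -- even zone count: no lone centre; front ++ back.reverse is the plain flatten = body
    have hn2 : n % 2 = 0 := by
      have h := hzeven
      rw [show (2 : Int) = ((2 : Nat) : Int) from rfl, PySem.Int.mod_natCast] at h
      exact_mod_cast h
    have hcore : segFlat colors p.toNat 0 (n / 2)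
        ++ (if n / 2 = n - 1 - n / 2 then
              List.replicate p.toNat (PySem.List.pyGetD colors ((n / 2 : Nat) : Int) "")
                ++ List.replicate r.toNat (PySem.List.pyGetD colors ((n / 2 : Nat) : Int) "")
            else [])
        ++ (revSegFlat colors p.toNat (n - 1) (n / 2)).reverse = body := by
      rw [if_neg (show ¬ (n / 2 = n - 1 - n / 2) from by omega),
          revSegFlat_reverse colors p.toNat (n / 2) (n - 1) (by omega),
          show n - 1 + 1 - n / 2 = n / 2 from by omega, List.append_nil,
          show segFlat colors p.toNat (n / 2) (n / 2)
            = segFlat colors p.toNat (0 + n / 2) (n / 2) from by rw [Nat.zero_add],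
          segFlat_append,
          show n / 2 + n / 2 = n from by omega,
          segFlat_eq_flatMap colors p.toNat n 0 (by omega),
          List.drop_zero, hn, List.take_length]
    by_cases hr0 : r = 0
    · rw [if_neg (not_not_intro hr0), if_neg (fun h => h.1 hr0), hcore]
    · have hre : PySem.Int.mod r 2 = 0 := heven hzeven
      rw [if_pos (show r ≠ 0 from hr0), if_pos hzeven, if_pos hre,
          if_pos (And.intro (show r ≠ 0 from hr0) hzeven), if_neg (not_not_intro hre), hcore]
      congr 2
      rw [PySem.List.pyGetD_neg_ofNat colors 1 "" (by omega) (by omega),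
          show ((n : Nat) : Int) - 1 = ((n - 1 : Nat) : Int) from by omega,
          PySem.List.pyGetD_natCast, List.getD_eq_getElem _ _ (by omega)]
  · -- odd zone count: the lone centre zone carries the r leftovers
    have hn2 : n % 2 = 1 := by
      rcases Nat.mod_two_eq_zero_or_one n with h | h
      · exact absurd (by rw [show (2 : Int) = ((2 : Nat) : Int) from rfl,
            PySem.Int.mod_natCast]; exact_mod_cast h) hzeven
      · exact h
    set m : Nat := n / 2 with hm
    set x : String := colors.getD m "" with hx
    set P := (colors.take m).flatMap (fun c => List.replicate p.toNat c) with hP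
    set S := (colors.drop (m + 1)).flatMap (fun c => List.replicate p.toNat c) with hS
    have hcore : segFlat colors p.toNat 0 m
        ++ (if m = n - 1 - m then
              List.replicate p.toNat (PySem.List.pyGetD colors ((m : Nat) : Int) "")
                ++ List.replicate r.toNat (PySem.List.pyGetD colors ((m : Nat) : Int) "")
            else [])
        ++ (revSegFlat colors p.toNat (n - 1) m).reverse
        = P ++ (List.replicate p.toNat x ++ List.replicate r.toNat x) ++ S := by
      rw [if_pos (show m = n - 1 - m from by omega),
          revSegFlat_reverse colors p.toNat m (n - 1) (by omega),
          show n - 1 + 1 - m = m + 1 from by omega,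
          PySem.List.pyGetD_natCast,
          segFlat_eq_flatMap colors p.toNat m 0 (by omega),
          segFlat_eq_flatMap colors p.toNat m (m + 1) (by omega),
          List.drop_zero,
          show (colors.drop (m + 1)).take m = colors.drop (m + 1) from
            List.take_of_length_le (by simp only [List.length_drop]; omega)]
    have hsplit : body = P ++ List.replicate p.toNat x ++ S := by
      rw [hbody]
      conv_lhs => rw [← List.take_append_drop m colors]
      rw [List.drop_eq_getElem_cons (l := colors) (show m < colors.length from by omega)]
      simp only [List.flatMap_append, List.flatMap_cons]
      rw [hx, List.getD_eq_getElem _ _ (show m < colors.length from by omega)]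
      rw [hP, hS]
      simp [List.append_assoc]
    have hPS : P.length = S.length := by
      rw [hP, hS, flatMap_replicate_length, flatMap_replicate_length]
      simp only [List.length_take, List.length_drop]
      congr 1
      omega
    by_cases hr0 : r = 0
    · rw [if_neg (not_not_intro hr0), if_neg (fun h => h.1 hr0), hcore, hsplit, hr0]
      simp
    · rw [if_pos (show r ≠ 0 from hr0), if_neg hzeven, if_neg (fun h => hzeven h.2), hcore]
      have hxx : PySem.List.pyGetD colors (PySem.Int.floordiv ((n : Nat) : Int) 2) "" = x := by
        rw [show PySem.Int.floordiv ((n : Nat) : Int) 2 = ((m : Nat) : Int) from by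
              rw [hm]; exact_mod_cast PySem.Int.floordiv_natCast n 2,
            PySem.List.pyGetD_natCast, hx]
      rw [hxx]
      have hmid : body = body.take (body.length / 2) ++ List.replicate 0 x
          ++ body.drop (body.length / 2) := by simp
      conv_lhs => rw [hmid]
      have hT : (body.take (body.length / 2)).length
          = ((body.take (body.length / 2)).length + (body.drop (body.length / 2)).length) / 2 := by
        simp only [List.length_take, List.length_drop]
        omega
      rw [insert_mid_foldl _ _ x hT r.toNat 0]
      simp only [Nat.zero_add]
      conv_lhs => rw [hsplit]
      exact take_drop_mid P S x p.toNat r.toNat hPS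

-- ===== VERDICT (by name: the statement is the Claim_ definition above) =====
theorem sensor_zones_spec : Claim_equal_sensor_zones := by
  intro sensors_count colors _ hpre
  unfold Spec_sensor_zones
  exact sensor_zones_eq sensors_count colors hpre
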